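-- pv_equiv track=rewrite | github.com/ugeorge/phdb | phdb/frontend/plain.py | _strHeaderF
-- ===== SOURCE A (Python) =====
-- def _strHeaderF( f ):
-- 	tmp = f
-- 	string = ''
-- 	inside = False
-- 	for line in f:
-- 		if line.startswith('%%'):
-- 			inside = True
-- 			string += line[2:]
-- 		else:
-- 			if inside: return string
-- 	return string
-- ===== SOURCE B (Python) =====
-- def _strHeaderF(f):
--     lines = list(f)
--     n = len(lines)
--     i = 0
--     while i < n and not lines[i].startswith('%%'):
--         i += 1
--     j = i
--     while j < n and lines[j].startswith('%%'):
--         j += 1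
--     return ''.join(line[2:] for line in lines[i:j])
-- ===== Notes on version B (the rewrite author's own statement) =====
-- stated objective: idiomatic
-- what changed: Replaces the fused loop with its 'inside' flag and early return by two explicit phases: scan to the first %%-line, scan to the end of the contiguous %% block, then join the slice.
import Mathlib
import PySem

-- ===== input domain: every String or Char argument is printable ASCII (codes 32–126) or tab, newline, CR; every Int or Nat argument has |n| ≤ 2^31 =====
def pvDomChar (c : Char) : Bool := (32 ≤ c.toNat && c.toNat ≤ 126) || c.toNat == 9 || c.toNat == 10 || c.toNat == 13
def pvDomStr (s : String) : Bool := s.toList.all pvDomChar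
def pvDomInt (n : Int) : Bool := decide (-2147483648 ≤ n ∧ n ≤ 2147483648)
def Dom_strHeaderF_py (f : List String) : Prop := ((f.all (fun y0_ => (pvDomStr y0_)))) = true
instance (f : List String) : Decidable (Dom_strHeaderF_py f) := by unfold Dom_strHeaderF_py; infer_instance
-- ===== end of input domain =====

-- B replaces A's fused loop with an 'inside' flag by two explicit phases (drop to the first %% line, take the contiguous %% block, join the tails); idiomatic, same cost.


-- ===== PORT A =====
-- the loop: state = (string so far, inside flag); early 'return string' = stop recursing
def pvALoop : List String → List Char → Bool → List Char
  | [], s, _ => s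
  | l :: ls, s, inside =>
    if PySem.Str.startswith l "%%" then
      pvALoop ls (s ++ (PySem.Str.slice l (some 2) none).toList) true
    else if inside then s else pvALoop ls s inside

def strHeaderF_py (f : List String) : String := String.ofList (pvALoop f [] false)

-- ===== PORT B =====
-- 'while i < n and not lines[i].startswith("%%")': skip the leading non-%% lines
def pvBDrop : List String → List String
  | [] => []
  | l :: ls => if PySem.Str.startswith l "%%" then l :: ls else pvBDrop ls

-- 'while j < n and lines[j].startswith("%%")': the contiguous %% block
def pvBTake : List String → List String
  | [] => []
  | l :: ls => if PySem.Str.startswith l "%%" then l :: pvBTake ls else []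

-- ''.join(line[2:] for line in lines[i:j])  (join with empty separator = concatenation)
def strHeaderF_py_alt (f : List String) : String :=
  String.ofList (((pvBTake (pvBDrop f)).map
    (fun l => (PySem.Str.slice l (some 2) none).toList)).flatten)

-- ===== PRECONDITION & SPEC =====
def Spec_strHeaderF_py (f : List String) (out : String) : Prop := out = strHeaderF_py_alt f
instance (f : List String) (out : String) : Decidable (Spec_strHeaderF_py f out) := by unfold Spec_strHeaderF_py; infer_instance

-- ===== CLAIM (what is proved, stated in full; the proofs are below) =====
def Claim_equal_strHeaderF_py : Prop := ∀ (f : List String), Dom_strHeaderF_py f → Spec_strHeaderF_py f (strHeaderF_py f)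

-- ===== LEMMAS AND PROOFS =====
def pvJoinTake (f : List String) : List Char :=
  ((pvBTake f).map (fun l => (PySem.Str.slice l (some 2) none).toList)).flatten

theorem pvALoop_true (f : List String) (s : List Char) :
    pvALoop f s true = s ++ pvJoinTake f := by
  induction f generalizing s with
  | nil => simp [pvALoop, pvJoinTake, pvBTake]
  | cons l ls ih =>
    by_cases h : PySem.Str.startswith l "%%" = true <;>
      rw [PySem.Str.startswith_eq, show ("%%":String).toList = ['%','%'] from rfl] at h <;>
      simp [pvALoop, pvJoinTake, pvBTake, PySem.Str.startswith_eq, h, ih]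

theorem pvALoop_false (f : List String) (s : List Char) :
    pvALoop f s false = s ++ pvJoinTake (pvBDrop f) := by
  induction f generalizing s with
  | nil => simp [pvALoop, pvJoinTake, pvBDrop, pvBTake]
  | cons l ls ih =>
    by_cases h : PySem.Str.startswith l "%%" = true <;>
      rw [PySem.Str.startswith_eq, show ("%%":String).toList = ['%','%'] from rfl] at h <;>
      simp [pvALoop, pvBDrop, pvBTake, PySem.Str.startswith_eq, h, pvALoop_true, pvJoinTake, ih]

-- ===== VERDICT (by name: the statement is the Claim_ definition above) =====
theorem strHeaderF_py_spec : Claim_equal_strHeaderF_py := by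
  intro f _
  unfold Spec_strHeaderF_py strHeaderF_py strHeaderF_py_alt
  rw [pvALoop_false]
  simp [pvJoinTake]
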